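-- pv_equiv track=rewrite | github.com/Ivystrode/python-algorithms | basic_minis.py | tower_builder
-- ===== SOURCE A (Python) =====
-- def tower_builder(n_floors):
--     """Returns a list where each element is the number of asterisks of the floor number...should appear stacked like a tower"""
--     tower = []
--     spacing = n_floors - 1
--     stars = 1
--     for i in range(0, n_floors):
--         tower.append(" " * spacing + "*" * stars + spacing * " ")
--         stars += 2
--         spacing -= 1
--     return tower
-- ===== SOURCE B (Python) =====
-- def tower_builder(n_floors):
--     """Returns a list where each element is the number of asterisks of the floor number...should appear stacked like a tower"""
--     rows = []
--     pad = ''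
--     stars = '*' * (2 * n_floors - 1)
--     while stars:
--         rows.append(pad + stars + pad)
--         stars = stars[2:]
--         pad += ' '
--     return rows[::-1]
-- ===== Notes on version B (the rewrite author's own statement) =====
-- stated objective: alternative
-- what changed: Builds the tower back-to-front: starting from the full bottom row of stars, a while loop shrinks the star string by two and grows a pad string by one space per step, appending bottom-up and reversing the list at the end, instead of A's top-down loop over range(n) threading integer spacing/stars counters into three-part repetition concatenations.
import Mathlib
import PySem

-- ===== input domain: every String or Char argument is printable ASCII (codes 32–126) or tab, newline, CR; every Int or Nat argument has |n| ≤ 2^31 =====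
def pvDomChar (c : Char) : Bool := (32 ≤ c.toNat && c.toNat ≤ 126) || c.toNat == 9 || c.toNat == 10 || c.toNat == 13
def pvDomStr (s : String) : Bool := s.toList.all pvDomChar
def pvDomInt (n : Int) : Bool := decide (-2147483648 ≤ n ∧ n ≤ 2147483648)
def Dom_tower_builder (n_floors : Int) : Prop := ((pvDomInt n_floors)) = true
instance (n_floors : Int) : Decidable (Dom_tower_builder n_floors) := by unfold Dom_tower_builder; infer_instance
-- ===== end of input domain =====

-- B builds the tower back-to-front from the full bottom row, shrinking a star string and
-- growing a pad string, then reverses; proved equal to A's top-down counter loop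
-- (objective: alternative).

-- ===== PORT A =====
-- A's loop: state (tower, spacing, stars); the loop variable i is unused.
-- Python "s" * n is PySem.List.pyRepeat on chars; '+' on str is concatenation, so the
-- row is String.ofList of the concatenated char lists (exact).
def tower_builder (n_floors : Int) : List String :=
  ((PySem.List.pyRange 0 n_floors 1).foldl
    (fun (st : List String × Int × Int) _i =>
      (st.1 ++ [String.ofList (PySem.List.pyRepeat [' '] st.2.1 ++
                           PySem.List.pyRepeat ['*'] st.2.2 ++
                           PySem.List.pyRepeat [' '] st.2.1)],
       st.2.1 - 1, st.2.2 + 2))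
    ([], n_floors - 1, 1)).1

-- ===== PORT B =====
-- Source B's while loop: state (rows, pad, stars); runs while stars is nonempty, appending
-- pad + stars + pad, then stars = stars[2:] (PySem.List.slice with start 2) and
-- pad += ' '.  Strings are carried as char lists; '+' on str is concatenation (exact).
def towerLoop (rows : List String) (pad stars : List Char) : List String :=
  if h : stars = [] then rows
  else
    towerLoop (rows ++ [String.ofList (pad ++ stars ++ pad)]) (pad ++ [' '])
      (PySem.List.slice stars (some 2) none)
termination_by stars.length
decreasing_by
  rw [show ((2 : Int) = ((2 : Nat) : Int)) from rfl, PySem.List.slice_from_natCast]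
  have hne : stars.length ≠ 0 := by simpa using h
  simp only [List.length_drop]
  omega

-- rows[::-1] is List.reverse (PySem.List.slice?_none_none_neg_one)
def tower_builder_alt (n_floors : Int) : List String :=
  (towerLoop [] [] (PySem.List.pyRepeat ['*'] (2 * n_floors - 1))).reverse

-- ===== PRECONDITION & SPEC =====
def Spec_tower_builder (n_floors : Int) (out : List String) : Prop := out = tower_builder_alt n_floors
instance (n_floors : Int) (out : List String) : Decidable (Spec_tower_builder n_floors out) := by unfold Spec_tower_builder; infer_instance

-- ===== CLAIM =====
def Claim_equal_tower_builder : Prop := ∀ (n_floors : Int), Dom_tower_builder n_floors → Spec_tower_builder n_floors (tower_builder n_floors)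

-- ===== LEMMAS AND PROOFS =====

-- the row A appends with accumulator values sp (spacing) and st (stars)
def pvRowA (sp st : Int) : String :=
  String.ofList (PySem.List.pyRepeat [' '] sp ++ PySem.List.pyRepeat ['*'] st ++ PySem.List.pyRepeat [' '] sp)

-- A's fold ignores the list elements; its first component is acc ++ the rows produced
-- by the evolving accumulators, one per element.
theorem pvFoldA (l : List Int) (acc : List String) (sp st : Int) :
    ((l.foldl
      (fun (s : List String × Int × Int) _i =>
        (s.1 ++ [String.ofList (PySem.List.pyRepeat [' '] s.2.1 ++
                            PySem.List.pyRepeat ['*'] s.2.2 ++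
                            PySem.List.pyRepeat [' '] s.2.1)],
         s.2.1 - 1, s.2.2 + 2))
      (acc, sp, st)).1)
    = acc ++ (List.range l.length).map (fun (k : Nat) => pvRowA (sp - (k : Int)) (st + 2 * (k : Int))) := by
  induction l generalizing acc sp st with
  | nil => simp
  | cons h t ih =>
    rw [List.foldl_cons, ih, List.length_cons, List.range_succ_eq_map, List.map_cons,
      List.map_map]
    simp only [List.append_assoc, List.singleton_append]
    congr 1
    congr 1
    · simp [pvRowA]
    apply List.map_congr_left
    intro k _
    simp only [Function.comp]
    congr 1 <;> push_cast <;> ring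

-- one unfolding step of towerLoop on a nonempty star string
theorem pvLoopStep (rows : List String) (pad stars : List Char) (h : stars ≠ []) :
    towerLoop rows pad stars
      = towerLoop (rows ++ [String.ofList (pad ++ stars ++ pad)]) (pad ++ [' ']) (stars.drop 2) := by
  rw [towerLoop, dif_neg h,
    show ((2 : Int) = ((2 : Nat) : Int)) from rfl, PySem.List.slice_from_natCast]

-- the row B appends with pad length p and star count s
def pvRowB (p s : Nat) : String :=
  String.ofList (List.replicate p ' ' ++ List.replicate s '*' ++ List.replicate p ' ')

-- the loop on an odd star string of length 2m+1 with pad p appends the m+1 rows bottom-up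
theorem pvLoopEq (m : Nat) : ∀ (p : Nat) (rows : List String),
    towerLoop rows (List.replicate p ' ') (List.replicate (2 * m + 1) '*')
      = rows ++ (List.range (m + 1)).map (fun (j : Nat) => pvRowB (p + j) (2 * (m - j) + 1)) := by
  induction m with
  | zero =>
    intro p rows
    rw [pvLoopStep _ _ _ (by simp), show (List.replicate (2 * 0 + 1) '*').drop 2 = [] by simp,
      towerLoop]
    rw [dif_pos rfl]
    simp [pvRowB]
  | succ m ih =>
    intro p rows
    rw [pvLoopStep _ _ _ (by simp)]
    have hd : (List.replicate (2 * (m + 1) + 1) '*').drop 2 = List.replicate (2 * m + 1) '*' := by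
      rw [List.drop_replicate, show 2 * (m + 1) + 1 - 2 = 2 * m + 1 from by omega]
    have hp : List.replicate p ' ' ++ [' '] = List.replicate (p + 1) ' ' := by
      rw [← List.replicate_succ']
    rw [hd, hp, ih (p + 1)]
    conv_rhs => rw [List.range_succ_eq_map]
    rw [List.map_cons, List.map_map, List.append_assoc, List.singleton_append]
    congr 1
    congr 1
    apply List.map_congr_left
    intro j hj
    simp only [List.mem_range] at hj
    simp only [Function.comp]
    have e1 : p + 1 + j = p + (j + 1) := by omega
    have e2 : 2 * (m - j) + 1 = 2 * (m + 1 - (j + 1)) + 1 := by omega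
    rw [e1, e2]

-- B's result is exactly A's rows, indexed top-down
theorem pvAltEq (n : Int) :
    tower_builder_alt n
      = (List.range n.toNat).map (fun (k : Nat) => pvRowA (n - 1 - (k : Int)) (1 + 2 * (k : Int))) := by
  unfold tower_builder_alt
  by_cases h : n ≤ 0
  · have h0 : (2 * n - 1).toNat = 0 := by omega
    have hn : n.toNat = 0 := by omega
    simp [PySem.List.pyRepeat_singleton, h0, hn, towerLoop]
  · have h1 : (2 * n - 1).toNat = 2 * (n.toNat - 1) + 1 := by omega
    rw [PySem.List.pyRepeat_singleton, h1,
      show ([] : List Char) = List.replicate 0 ' ' from rfl, pvLoopEq (n.toNat - 1) 0 []]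
    simp only [List.nil_append, Nat.zero_add]
    apply List.ext_getElem
    · simp; omega
    · intro i hi1 hi2
      rw [List.getElem_reverse]
      simp only [List.length_map, List.length_range] at hi1 hi2 ⊢
      simp only [List.getElem_map, List.getElem_range]
      unfold pvRowA pvRowB
      simp only [PySem.List.pyRepeat_singleton]
      have e1 : (n - 1 - (i : Int)).toNat = n.toNat - 1 + 1 - 1 - i := by omega
      have e2 : (1 + 2 * (i : Int)).toNat = 2 * (n.toNat - 1 - (n.toNat - 1 + 1 - 1 - i)) + 1 := by omega
      rw [e1, e2]

-- ===== VERDICT =====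
theorem tower_builder_spec : Claim_equal_tower_builder := by
  intro n _
  unfold Spec_tower_builder tower_builder
  rw [pvFoldA, pvAltEq]
  rw [PySem.List.length_pyRange_one]
  simp only [List.nil_append, Int.sub_zero]
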